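-- pv_equiv track=rewrite | github.com/cttailearn/agent-cli | agents/tools.py | _identity_memory_iter_blocks
-- ===== SOURCE A (Python) =====
-- _IDENTITY_MEMORY_BLOCK_START = "<IDENTITY_AUTH>"
--
-- _IDENTITY_MEMORY_BLOCK_END = "</IDENTITY_AUTH>"
--
-- def _identity_memory_parse_kv(body: str) -> dict[str, str]:
--     out: dict[str, str] = {}
--     for raw_line in (body or "").splitlines():
--         line = (raw_line or "").strip()
--         if not line:
--             continue
--         k, sep, v = line.partition(":")
--         if not sep:
--             continue
--         key = (k or "").strip()
--         val = (v or "").strip()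
--         if key:
--             out[key] = val
--     return out
--
-- def _identity_memory_iter_blocks(text: str) -> list[tuple[int, int, dict[str, str]]]:
--     t = text or ""
--     out: list[tuple[int, int, dict[str, str]]] = []
--     pos = 0
--     while True:
--         start = t.find(_IDENTITY_MEMORY_BLOCK_START, pos)
--         if start < 0:
--             break
--         end = t.find(_IDENTITY_MEMORY_BLOCK_END, start + len(_IDENTITY_MEMORY_BLOCK_START))
--         if end < 0:
--             break
--         end2 = end + len(_IDENTITY_MEMORY_BLOCK_END)
--         body = t[start + len(_IDENTITY_MEMORY_BLOCK_START) : end]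
--         data = _identity_memory_parse_kv(body)
--         out.append((start, end2, data))
--         pos = end2
--     return out
-- ===== SOURCE B (Python) =====
-- _IDENTITY_MEMORY_BLOCK_START = "<IDENTITY_AUTH>"
--
-- _IDENTITY_MEMORY_BLOCK_END = "</IDENTITY_AUTH>"
--
-- def _identity_memory_parse_kv(body: str) -> dict[str, str]:
--     out: dict[str, str] = {}
--     for raw_line in (body or "").splitlines():
--         line = (raw_line or "").strip()
--         if not line:
--             continue
--         k, sep, v = line.partition(":")
--         if not sep:
--             continue
--         key = (k or "").strip()
--         val = (v or "").strip()
--         if key: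
--             out[key] = val
--     return out
--
-- def _identity_memory_iter_blocks(text: str) -> list[tuple[int, int, dict[str, str]]]:
--     # One-pass character scanner (two-state machine) instead of repeated str.find + slicing.
--     t = text or ""
--     out: list[tuple[int, int, dict[str, str]]] = []
--     i = 0
--     start = None  # None: looking for a START tag; else: index where the open block started
--     buf: list[str] = []
--     n = len(t)
--     while i < n:
--         if start is None:
--             if t.startswith(_IDENTITY_MEMORY_BLOCK_START, i):
--                 start = i
--                 i += len(_IDENTITY_MEMORY_BLOCK_START)
--                 buf = []
--             else:
--                 i += 1
--         else:
--             if t.startswith(_IDENTITY_MEMORY_BLOCK_END, i):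
--                 i += len(_IDENTITY_MEMORY_BLOCK_END)
--                 out.append((start, i, _identity_memory_parse_kv("".join(buf))))
--                 start = None
--             else:
--                 buf.append(t[i])
--                 i += 1
--     return out
-- ===== Notes on version B (the rewrite author's own statement) =====
-- stated objective: alternative
-- what changed: A repeatedly calls str.find for the START and END tags and slices the body out of the text; B walks the text once with a two-state character scanner (looking-for-START / inside-block) that accumulates the body characters as it goes.
import Mathlib
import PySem

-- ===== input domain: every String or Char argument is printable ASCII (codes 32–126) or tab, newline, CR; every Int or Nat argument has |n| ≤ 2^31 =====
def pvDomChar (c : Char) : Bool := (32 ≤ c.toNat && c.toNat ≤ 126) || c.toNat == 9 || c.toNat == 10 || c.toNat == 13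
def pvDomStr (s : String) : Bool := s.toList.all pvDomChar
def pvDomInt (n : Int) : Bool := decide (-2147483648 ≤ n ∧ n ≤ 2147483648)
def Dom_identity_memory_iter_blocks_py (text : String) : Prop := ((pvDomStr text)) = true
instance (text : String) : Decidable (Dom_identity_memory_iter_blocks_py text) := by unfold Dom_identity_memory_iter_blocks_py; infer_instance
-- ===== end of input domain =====

-- B replaces A's repeated str.find + slicing scanner by a one-pass two-state character scanner
-- that accumulates the body while walking the text once (objective: alternative, same cost class).


-- ===== PORT A =====
-- shared tag constants (module-level constants in the Python source)
def pvStart : List Char := "<IDENTITY_AUTH>".toList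
def pvEnd : List Char := "</IDENTITY_AUTH>".toList

-- shared helper `_identity_memory_parse_kv` (both A and B call it unchanged);
-- `line.partition(":")` is ported by hand via the first ':' (exact: partition splits at the
-- first occurrence, and `sep` is empty iff ':' does not occur).
def pvParseKV (body : List Char) : List (String × String) :=
  ((PySem.Chars.splitlines body).foldl (fun out raw_line =>
    let line := PySem.Chars.strip raw_line
    if line = [] then out
    else
      let r := PySem.Chars.find line [':']
      if r = -1 then out
      else
        let key := PySem.Chars.strip (List.take r.toNat line)
        let val := PySem.Chars.strip (List.drop (r.toNat + 1) line)
        if key = [] then out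
        else PySem.Dict.insert out (String.ofList key) (String.ofList val))
    (PySem.Dict.mk [])).items

-- A's while-loop: find START from pos, find END after it, slice the body, resume after END.
-- The Nat argument is ONLY a totality guard (each iteration advances pos by ≥ 31, so
-- t.length + 1 steps are never exhausted — proved inside pv_main).
def identity_memory_iter_blocks_py_loop : Nat → List Char → Int → List (Int × Int × (List (String × String)))
  | 0, _, _ => []
  | fuel + 1, t, pos =>
    let start := PySem.Chars.findFrom t pvStart pos
    if start < 0 then []
    else
      let e := PySem.Chars.findFrom t pvEnd (start + (pvStart.length : Int))
      if e < 0 then []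
      else
        let end2 := e + (pvEnd.length : Int)
        let body := PySem.List.slice t (some (start + (pvStart.length : Int))) (some e)
        (start, end2, pvParseKV body) :: identity_memory_iter_blocks_py_loop fuel t end2

def identity_memory_iter_blocks_py (text : String) : List (Int × Int × (List (String × String))) :=
  identity_memory_iter_blocks_py_loop (text.toList.length + 1) text.toList 0

-- ===== PORT B =====
-- B's one-pass scanner: state `none` = looking for a START tag, state `some (start, buf)` =
-- inside a block opened at `start`, accumulating the body characters in `buf` until the END tag.
-- `s` is the unread rest of the text and `i` its absolute position; the Nat argument is ONLY a
-- totality guard (every step consumes at least one character, so s.length steps suffice).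
def pvAltScan : Nat → List Char → Int → Option (Int × List Char) → List (Int × Int × (List (String × String)))
  | 0, _, _, _ => []
  | _ + 1, [], _, _ => []
  | fuel + 1, c :: rest, i, none =>
    if pvStart.isPrefixOf (c :: rest) then
      pvAltScan fuel ((c :: rest).drop pvStart.length) (i + (pvStart.length : Int)) (some (i, []))
    else pvAltScan fuel rest (i + 1) none
  | fuel + 1, c :: rest, i, some (start, buf) =>
    if pvEnd.isPrefixOf (c :: rest) then
      (start, i + (pvEnd.length : Int), pvParseKV buf) ::
        pvAltScan fuel ((c :: rest).drop pvEnd.length) (i + (pvEnd.length : Int)) none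
    else pvAltScan fuel rest (i + 1) (some (start, buf ++ [c]))

def identity_memory_iter_blocks_py_alt (text : String) : List (Int × Int × (List (String × String))) :=
  pvAltScan text.toList.length text.toList 0 none

-- ===== PRECONDITION & SPEC =====
def Spec_identity_memory_iter_blocks_py (text : String) (out : List (Int × Int × (List (String × String)))) : Prop := out = identity_memory_iter_blocks_py_alt text
instance (text : String) (out : List (Int × Int × (List (String × String)))) : Decidable (Spec_identity_memory_iter_blocks_py text out) := by unfold Spec_identity_memory_iter_blocks_py; infer_instance

-- ===== CLAIM (what is proved, stated in full; the proofs are below) =====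
def Claim_equal_identity_memory_iter_blocks_py : Prop := ∀ (text : String), Dom_identity_memory_iter_blocks_py text → Spec_identity_memory_iter_blocks_py text (identity_memory_iter_blocks_py text)

-- ===== LEMMAS AND PROOFS =====

theorem pvStart_ne : pvStart ≠ [] := by decide

theorem pvEnd_ne : pvEnd ≠ [] := by decide

theorem pv_find_shift (sub : List Char) (hsub : sub ≠ []) :
    ∀ (l : List Char) (k : Nat), PySem.Chars.find.go sub l k =
      (if PySem.Chars.find l sub = -1 then -1 else PySem.Chars.find l sub + k) := by
  intro l
  induction l with
  | nil =>
    intro k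
    simp [PySem.Chars.find, PySem.Chars.find.go, List.isEmpty_iff, hsub]
  | cons c rest ih =>
    intro k
    rw [PySem.Chars.find.go]
    rw [show PySem.Chars.find (c :: rest) sub = PySem.Chars.find.go sub (c :: rest) 0 from rfl]
    rw [PySem.Chars.find.go]
    by_cases hp : sub.isPrefixOf (c :: rest)
    · simp [hp]
    · simp only [hp, if_false, Bool.false_eq_true]
      rw [ih (k+1), ih 1]
      have hge := PySem.Chars.neg_one_le_find rest sub
      split_ifs <;> omega

theorem pv_find_nil (sub : List Char) (hsub : sub ≠ []) : PySem.Chars.find [] sub = -1 := by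
  simp [PySem.Chars.find, PySem.Chars.find.go, List.isEmpty_iff, hsub]

theorem pv_find_cons (sub : List Char) (hsub : sub ≠ []) (c : Char) (l : List Char) :
    PySem.Chars.find (c :: l) sub =
      (if sub.isPrefixOf (c :: l) then 0
       else if PySem.Chars.find l sub = -1 then -1 else PySem.Chars.find l sub + 1) := by
  rw [show PySem.Chars.find (c :: l) sub = PySem.Chars.find.go sub (c :: l) 0 from rfl]
  rw [PySem.Chars.find.go]
  by_cases hp : sub.isPrefixOf (c :: l)
  · simp [hp]
  · simp only [hp, if_false, Bool.false_eq_true]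
    rw [pv_find_shift sub hsub l 1]
    split_ifs <;> simp

theorem pvAltScan_nil (fuel : Nat) (i : Int) (st : Option (Int × List Char)) :
    pvAltScan fuel [] i st = [] := by
  cases fuel <;> rfl

theorem pvAltScan_irrel : ∀ (fuel fuel' : Nat) (s : List Char) (i : Int) (st : Option (Int × List Char)),
    s.length ≤ fuel → s.length ≤ fuel' → pvAltScan fuel s i st = pvAltScan fuel' s i st := by
  intro fuel
  induction fuel with
  | zero =>
    intro fuel' s i st h h'
    have : s = [] := by
      cases s with
      | nil => rfl
      | cons c r => simp at h
    subst this
    rw [pvAltScan_nil, pvAltScan_nil]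
  | succ fuel ih =>
    intro fuel' s i st h h'
    cases s with
    | nil => rw [pvAltScan_nil, pvAltScan_nil]
    | cons c rest =>
      cases fuel' with
      | zero => simp at h'
      | succ fuel' =>
        simp only [List.length_cons] at h h'
        have hl15 : pvStart.length = 15 := by decide
        have hl16 : pvEnd.length = 16 := by decide
        rcases st with _ | ⟨start, buf⟩
        · rw [pvAltScan, pvAltScan]
          split_ifs
          · exact ih fuel' _ _ _ (by simp [hl15]; omega) (by simp [hl15]; omega)
          · exact ih fuel' _ _ _ (by omega) (by omega)
        · rw [pvAltScan, pvAltScan]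
          split_ifs
          · rw [ih fuel' _ _ _ (by simp [hl16]; omega) (by simp [hl16]; omega)]
          · exact ih fuel' _ _ _ (by omega) (by omega)

theorem pvScan_none : ∀ (s : List Char) (fuel : Nat) (i : Int), s.length ≤ fuel →
    PySem.Chars.find s pvStart = -1 → pvAltScan fuel s i none = [] := by
  intro s
  induction s with
  | nil => intro fuel i _ _; exact pvAltScan_nil fuel i none
  | cons c rest ih =>
    intro fuel i hf h
    rw [pv_find_cons pvStart pvStart_ne] at h
    have hn := PySem.Chars.neg_one_le_find rest pvStart
    by_cases hp : pvStart.isPrefixOf (c :: rest)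
    · simp [hp] at h
    · cases fuel with
      | zero => simp at hf
      | succ fuel =>
        rw [pvAltScan]
        simp only [hp, if_false, Bool.false_eq_true]
        apply ih fuel (i+1) (by simp at hf ⊢; omega)
        simp only [hp, if_false, Bool.false_eq_true] at h
        split_ifs at h with h2
        · exact h2
        · omega

theorem pvScan_skip1 : ∀ (s : List Char) (fuel : Nat) (i : Int) (r : Nat), s.length ≤ fuel →
    PySem.Chars.find s pvStart = (r : Int) →
    pvAltScan fuel s i none = pvAltScan (s.drop r).length (s.drop r) (i + r) none := by
  intro s
  induction s with
  | nil =>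
    intro fuel i r _ h
    rw [pv_find_nil pvStart pvStart_ne] at h; omega
  | cons c rest ih =>
    intro fuel i r hf h
    rw [pv_find_cons pvStart pvStart_ne] at h
    have hn := PySem.Chars.neg_one_le_find rest pvStart
    by_cases hp : pvStart.isPrefixOf (c :: rest)
    · simp only [hp, if_true] at h
      have : r = 0 := by omega
      subst this
      simp only [List.drop_zero, Nat.cast_zero, add_zero]
      exact pvAltScan_irrel fuel _ _ _ _ hf le_rfl
    · simp only [hp, if_false, Bool.false_eq_true] at h
      by_cases h2 : PySem.Chars.find rest pvStart = -1
      · rw [if_pos h2] at h; omega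
      · rw [if_neg h2] at h
        obtain ⟨n, rfl⟩ : ∃ n, r = n + 1 := ⟨r - 1, by omega⟩
        have h' : PySem.Chars.find rest pvStart = (n : Int) := by push_cast at h ⊢; omega
        cases fuel with
        | zero => simp at hf
        | succ fuel =>
          rw [pvAltScan]
          simp only [hp, if_false, Bool.false_eq_true]
          rw [ih fuel (i+1) n (by simp at hf ⊢; omega) h']
          simp only [List.drop_succ_cons]
          congr 1
          push_cast
          ring

theorem pvScan_enter (s : List Char) (fuel : Nat) (i : Int) (hf : s.length ≤ fuel)
    (h : pvStart.isPrefixOf s) :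
    pvAltScan fuel s i none =
      pvAltScan (s.drop pvStart.length).length (s.drop pvStart.length)
        (i + (pvStart.length : Int)) (some (i, [])) := by
  cases s with
  | nil => exact absurd h (by decide)
  | cons c rest =>
    cases fuel with
    | zero => simp at hf
    | succ fuel =>
      rw [pvAltScan]
      simp only [h, if_true]
      have hl15 : pvStart.length = 15 := by decide
      exact pvAltScan_irrel fuel _ _ _ _ (by simp [hl15] at hf ⊢; omega) le_rfl

theorem pvScan_end_none : ∀ (s : List Char) (fuel : Nat) (j start : Int) (buf : List Char),
    s.length ≤ fuel → PySem.Chars.find s pvEnd = -1 →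
    pvAltScan fuel s j (some (start, buf)) = [] := by
  intro s
  induction s with
  | nil => intro fuel j start buf _ _; exact pvAltScan_nil fuel j _
  | cons c rest ih =>
    intro fuel j start buf hf h
    rw [pv_find_cons pvEnd pvEnd_ne] at h
    have hn := PySem.Chars.neg_one_le_find rest pvEnd
    by_cases hp : pvEnd.isPrefixOf (c :: rest)
    · simp [hp] at h
    · cases fuel with
      | zero => simp at hf
      | succ fuel =>
        rw [pvAltScan]
        simp only [hp, if_false, Bool.false_eq_true]
        apply ih fuel (j+1) start (buf ++ [c]) (by simp at hf ⊢; omega)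
        simp only [hp, if_false, Bool.false_eq_true] at h
        split_ifs at h with h2
        · exact h2
        · omega

theorem pvScan_skip2 : ∀ (s : List Char) (fuel : Nat) (j start : Int) (buf : List Char) (r : Nat),
    s.length ≤ fuel → PySem.Chars.find s pvEnd = (r : Int) →
    pvAltScan fuel s j (some (start, buf)) =
      pvAltScan (s.drop r).length (s.drop r) (j + r) (some (start, buf ++ s.take r)) := by
  intro s
  induction s with
  | nil =>
    intro fuel j start buf r _ h
    rw [pv_find_nil pvEnd pvEnd_ne] at h; omega
  | cons c rest ih =>
    intro fuel j start buf r hf h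
    rw [pv_find_cons pvEnd pvEnd_ne] at h
    have hn := PySem.Chars.neg_one_le_find rest pvEnd
    by_cases hp : pvEnd.isPrefixOf (c :: rest)
    · simp only [hp, if_true] at h
      have : r = 0 := by omega
      subst this
      simp only [List.drop_zero, List.take_zero, List.append_nil, Nat.cast_zero, add_zero]
      exact pvAltScan_irrel fuel _ _ _ _ hf le_rfl
    · simp only [hp, if_false, Bool.false_eq_true] at h
      by_cases h2 : PySem.Chars.find rest pvEnd = -1
      · rw [if_pos h2] at h; omega
      · rw [if_neg h2] at h
        obtain ⟨n, rfl⟩ : ∃ n, r = n + 1 := ⟨r - 1, by omega⟩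
        have h' : PySem.Chars.find rest pvEnd = (n : Int) := by push_cast at h ⊢; omega
        cases fuel with
        | zero => simp at hf
        | succ fuel =>
          rw [pvAltScan]
          simp only [hp, if_false, Bool.false_eq_true]
          rw [ih fuel (j+1) start (buf ++ [c]) n (by simp at hf ⊢; omega) h']
          simp only [List.drop_succ_cons, List.take_succ_cons, List.append_assoc,
            List.singleton_append]
          congr 1
          push_cast
          ring

theorem pvScan_emit (s : List Char) (fuel : Nat) (j start : Int) (buf : List Char)
    (hf : s.length ≤ fuel) (h : pvEnd.isPrefixOf s) :
    pvAltScan fuel s j (some (start, buf)) =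
      (start, j + (pvEnd.length : Int), pvParseKV buf) ::
        pvAltScan (s.drop pvEnd.length).length (s.drop pvEnd.length)
          (j + (pvEnd.length : Int)) none := by
  cases s with
  | nil => exact absurd h (by decide)
  | cons c rest =>
    cases fuel with
    | zero => simp at hf
    | succ fuel =>
      rw [pvAltScan]
      simp only [h, if_true]
      have hl16 : pvEnd.length = 16 := by decide
      rw [pvAltScan_irrel fuel _ _ _ _ (by simp [hl16] at hf ⊢; omega) le_rfl]

theorem pv_main (fuel : Nat) : ∀ (t : List Char) (pos : Nat), t.length - pos ≤ fuel → pos ≤ t.length →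
    identity_memory_iter_blocks_py_loop fuel t (pos : Int)
      = pvAltScan (t.drop pos).length (t.drop pos) (pos : Int) none := by
  induction fuel with
  | zero =>
    intro t pos hk hle
    have hnil : t.drop pos = [] := by
      apply List.drop_eq_nil_of_le
      omega
    rw [hnil, identity_memory_iter_blocks_py_loop, pvAltScan_nil]
  | succ fuel ih =>
    intro t pos hk hle
    rw [identity_memory_iter_blocks_py_loop,
      PySem.Chars.findFrom_natCast t pvStart pos hle]
    by_cases hf1 : PySem.Chars.find (t.drop pos) pvStart = -1
    · rw [if_pos hf1, if_pos (by norm_num)]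
      exact (pvScan_none _ _ _ le_rfl hf1).symm
    · rw [if_neg hf1]
      have hn1 := PySem.Chars.neg_one_le_find (t.drop pos) pvStart
      obtain ⟨r1, hr1⟩ : ∃ r1 : Nat, PySem.Chars.find (t.drop pos) pvStart = (r1 : Int) :=
        ⟨(PySem.Chars.find (t.drop pos) pvStart).toNat, (Int.toNat_of_nonneg (by omega)).symm⟩
      rw [hr1, if_neg (by omega)]
      have hspec1 := (PySem.Chars.find_spec (s := t.drop pos) (sub := pvStart) (by omega)).1
      rw [hr1] at hspec1
      simp only [Int.toNat_natCast, List.drop_drop] at hspec1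
      -- hspec1 : pvStart <+: t.drop (pos + r1)
      have hl15 : pvStart.length = 15 := by decide
      have hl16 : pvEnd.length = 16 := by decide
      have hfit1 : pos + r1 + 15 ≤ t.length := by
        have := hspec1.length_le
        simp [hl15] at this
        omega
      have hcast1 : ((pos : Int) + (r1 : Int) + (pvStart.length : Int)) = ((pos + r1 + 15 : Nat) : Int) := by
        push_cast [hl15]; ring
      rw [hcast1, PySem.Chars.findFrom_natCast t pvEnd _ hfit1]
      -- B side: skip to the START match, then enter the block
      have hpre1 : pvStart.isPrefixOf (t.drop (pos + r1)) := by
        rw [List.isPrefixOf_iff_prefix]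
        exact hspec1
      rw [pvScan_skip1 (t.drop pos) _ (pos : Int) r1 le_rfl hr1]
      rw [List.drop_drop]
      rw [pvScan_enter _ _ _ le_rfl hpre1]
      rw [List.drop_drop, hl15]
      by_cases hf2 : PySem.Chars.find (t.drop (pos + r1 + 15)) pvEnd = -1
      · rw [if_pos hf2, if_pos (by norm_num)]
        exact (pvScan_end_none _ _ _ _ _ le_rfl hf2).symm
      · rw [if_neg hf2]
        have hn2 := PySem.Chars.neg_one_le_find (t.drop (pos + r1 + 15)) pvEnd
        obtain ⟨r2, hr2⟩ : ∃ r2 : Nat, PySem.Chars.find (t.drop (pos + r1 + 15)) pvEnd = (r2 : Int) :=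
          ⟨_, (Int.toNat_of_nonneg (by omega)).symm⟩
        rw [hr2, if_neg (by omega)]
        have hspec2 := (PySem.Chars.find_spec (s := t.drop (pos + r1 + 15)) (sub := pvEnd) (by omega)).1
        rw [hr2] at hspec2
        simp only [Int.toNat_natCast, List.drop_drop] at hspec2
        have hfit2 : pos + r1 + 15 + r2 + 16 ≤ t.length := by
          have := hspec2.length_le
          simp [hl16] at this
          omega
        have hpre2 : pvEnd.isPrefixOf (t.drop (pos + r1 + 15 + r2)) := by
          rw [List.isPrefixOf_iff_prefix]
          exact hspec2
        rw [pvScan_skip2 _ _ _ _ _ r2 le_rfl hr2]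
        rw [List.drop_drop]
        rw [pvScan_emit _ _ _ _ _ le_rfl hpre2]
        rw [List.drop_drop, hl16]
        -- heads agree (body slice = scanned buffer) and tails agree (IH)
        have hbody : PySem.List.slice t (some ((pos + r1 + 15 : Nat) : Int))
            (some (((pos + r1 + 15 : Nat) : Int) + (r2 : Int)))
            = List.take r2 (List.drop (pos + r1 + 15) t) := by
          rw [show (((pos + r1 + 15 : Nat) : Int) + (r2 : Int)) = ((pos + r1 + 15 + r2 : Nat) : Int) by push_cast; ring]
          rw [PySem.List.slice_natCast]
          congr 1
          omega
        have hidx : (((pos + r1 + 15 : Nat) : Int) + (r2 : Int) + ((16 : Nat) : Int))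
            = ((pos : Int) + (r1 : Int) + ((15 : Nat) : Int) + (r2 : Int) + ((16 : Nat) : Int)) := by
          push_cast; ring
        have htail : identity_memory_iter_blocks_py_loop fuel t
              ((pos : Int) + (r1 : Int) + ((15 : Nat) : Int) + (r2 : Int) + ((16 : Nat) : Int))
            = pvAltScan (t.drop (pos + r1 + 15 + r2 + 16)).length (t.drop (pos + r1 + 15 + r2 + 16))
              ((pos : Int) + (r1 : Int) + ((15 : Nat) : Int) + (r2 : Int) + ((16 : Nat) : Int)) none := by
          have hc : ((pos : Int) + (r1 : Int) + ((15 : Nat) : Int) + (r2 : Int) + ((16 : Nat) : Int))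
              = ((pos + r1 + 15 + r2 + 16 : Nat) : Int) := by push_cast; ring
          rw [hc]
          exact ih t (pos + r1 + 15 + r2 + 16) (by omega) (by omega)
        simp only [List.nil_append]
        rw [hbody, hidx, htail]

-- ===== VERDICT (by name: the statement is the Claim_ definition above) =====
theorem identity_memory_iter_blocks_py_spec : Claim_equal_identity_memory_iter_blocks_py := by
  intro text _
  unfold Spec_identity_memory_iter_blocks_py identity_memory_iter_blocks_py identity_memory_iter_blocks_py_alt
  simpa using pv_main (text.toList.length + 1) text.toList 0 (by omega) (by omega)
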